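-- pv_equiv track=rewrite | github.com/vikky2810/GeekforGeeks-Solutions | September-2025/10_09_2025_gfg.py | largest_lexicographical
-- ===== SOURCE A (Python) =====
-- def largest_lexicographical(s: str) -> str:
--     n = len(s)
--     s_list = list(s)
--     for i in range(n):
--         max_char = s_list[i]
--         max_index = i
--         for j in range(i + 1, n):
--             if s_list[j] >= max_char:
--                 max_char = s_list[j]
--                 max_index = j
--         if max_char > s_list[i]:
--             s_list[i], s_list[max_index] = s_list[max_index], s_list[i]
--             return "".join(s_list)
--     return s
-- ===== SOURCE B (Python) =====
-- def largest_lexicographical(s: str) -> str: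
--     n = len(s)
--     # suff[k] = (max char of s[k:], index of its LAST occurrence), built right-to-left in O(n)
--     suff = [('\x00', -1)] * (n + 1)
--     for k in range(n - 1, -1, -1):
--         c, j = suff[k + 1]
--         suff[k] = (s[k], k) if s[k] > c else (c, j)
--     for i in range(n):
--         c, j = suff[i + 1]
--         if c > s[i]:
--             lst = list(s)
--             lst[i], lst[j] = lst[j], lst[i]
--             return "".join(lst)
--     return s
-- ===== Notes on version B (the rewrite author's own statement) =====
-- stated objective: faster
-- what changed: Replaced the O(n^2) rescan of the suffix for every position by a precomputed suffix-maximum array (max char of s[k:] with the index of its last occurrence), then one forward scan that swaps at the first position beaten by its suffix max.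
import Mathlib
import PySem

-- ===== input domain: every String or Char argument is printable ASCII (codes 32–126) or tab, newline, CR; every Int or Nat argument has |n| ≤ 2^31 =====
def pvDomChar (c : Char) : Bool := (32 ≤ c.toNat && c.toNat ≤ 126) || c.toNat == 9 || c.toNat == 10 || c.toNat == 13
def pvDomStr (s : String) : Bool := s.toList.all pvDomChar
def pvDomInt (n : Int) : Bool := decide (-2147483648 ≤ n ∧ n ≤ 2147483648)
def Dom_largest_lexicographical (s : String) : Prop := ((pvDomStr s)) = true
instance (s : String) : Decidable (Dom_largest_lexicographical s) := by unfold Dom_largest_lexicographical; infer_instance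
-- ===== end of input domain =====

-- B replaces A's per-position rescan of the whole suffix by a precomputed suffix-maximum
-- array (max char of s[k:] with the index of its last occurrence) and a single forward scan.

-- ===== PORT A =====
-- outer 'for i in range(n)' with early return, as recursion on i;
-- the inner 'for j in range(i+1, n)' is the foldl over pyRange carrying (max_char, max_index).
def largest_lexicographical_aux (s : String) (l : List Char) (i : Nat) : String :=
  if _h : i < l.length then
    let st := (PySem.List.pyRange ((i : Int) + 1) (l.length : Int) 1).foldl
      (fun (p : Char × Int) j =>
        let c := PySem.List.pyGetD l j (Char.ofNat 0)
        if p.1 ≤ c then (c, j) else p)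
      (PySem.List.pyGetD l (i : Int) (Char.ofNat 0), (i : Int))
    if PySem.List.pyGetD l (i : Int) (Char.ofNat 0) < st.1 then
      -- s_list[i], s_list[max_index] = s_list[max_index], s_list[i]; "".join(s_list)
      let a := PySem.List.pyGetD l (i : Int) (Char.ofNat 0)
      let b := PySem.List.pyGetD l st.2 (Char.ofNat 0)
      String.ofList ((l.set i b).set st.2.toNat a)   -- st.2 is a real index here (0 ≤ st.2), so toNat is exact
    else largest_lexicographical_aux s l (i + 1)
  else s
termination_by l.length - i

def largest_lexicographical (s : String) : String :=
  largest_lexicographical_aux s s.toList 0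

-- ===== PORT B =====
-- suffix array built right-to-left: pvSuffAux l k = [suff[k], suff[k+1], …, suff[n]] where
-- suff[k] = (max char of l[k:], index of its last occurrence), sentinel ('\x00', -1) at the end.
def pvSuffAux : List Char → Int → List (Char × Int)
  | [], _ => [(Char.ofNat 0, -1)]
  | c :: t, k =>
    let r := pvSuffAux t (k + 1)
    let p := r.headD (Char.ofNat 0, -1)
    (if p.1 < c then (c, k) else p) :: r

-- forward scan: at step i the head pair is (s[i], suff[i+1])
def pvScan (s : String) (l : List Char) : List (Char × (Char × Int)) → Nat → String
  | [], _ => s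
  | (ci, (mc, mj)) :: rest, i =>
    if ci < mc then
      let a := PySem.List.pyGetD l (i : Int) (Char.ofNat 0)
      let b := PySem.List.pyGetD l mj (Char.ofNat 0)
      String.ofList ((l.set i b).set mj.toNat a)   -- mj is a real index here (0 ≤ mj), so toNat is exact
    else pvScan s l rest (i + 1)

def largest_lexicographical_alt (s : String) : String :=
  let l := s.toList
  pvScan s l (l.zip (pvSuffAux l 0).tail) 0

-- ===== PRECONDITION & SPEC =====
def Spec_largest_lexicographical (s : String) (out : String) : Prop := out = largest_lexicographical_alt s
instance (s : String) (out : String) : Decidable (Spec_largest_lexicographical s out) := by unfold Spec_largest_lexicographical; infer_instance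

-- ===== CLAIM (what is proved, stated in full; the proofs are below) =====
def Claim_equal_largest_lexicographical : Prop := ∀ (s : String), Dom_largest_lexicographical s → Spec_largest_lexicographical s (largest_lexicographical s)

-- ===== LEMMAS AND PROOFS =====

-- pure recursive form of A's inner loop (left-to-right over the suffix, carrying the absolute index)
def pvG : List Char → Int → (Char × Int) → (Char × Int)
  | [], _, st => st
  | c :: t, j, st => pvG t (j + 1) (if st.1 ≤ c then (c, j) else st)

-- A's index fold over range(k, n) is pvG on the suffix l.drop k
lemma pvFoldl_eq_pvG (l : List Char) : ∀ (t : List Char) (k : Nat) (st : Char × Int),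
    t = l.drop k →
    (PySem.List.pyRange (k : Int) (l.length : Int) 1).foldl
      (fun (p : Char × Int) j =>
        let c := PySem.List.pyGetD l j (Char.ofNat 0)
        if p.1 ≤ c then (c, j) else p) st = pvG t (k : Int) st := by
  intro t
  induction t with
  | nil =>
    intro k st h
    have hk : l.length ≤ k := by
      have := List.drop_eq_nil_iff.mp h.symm
      omega
    rw [PySem.List.pyRange_one_eq_nil (by exact_mod_cast hk)]
    rfl
  | cons c t' ih =>
    intro k st h
    have hk : k < l.length := by
      by_contra hk
      rw [List.drop_eq_nil_of_le (by omega)] at h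
      simp at h
    have hd : l.drop k = c :: t' := h.symm
    have hget : l.getD k (Char.ofNat 0) = c := by
      have h0 : l[k]? = some c := by
        have := List.getElem?_drop (xs := l) (i := k) (j := 0)
        simpa [hd] using this.symm
      simp [List.getD_eq_getElem?_getD, h0]
    have ht' : t' = l.drop (k+1) := by
      have := List.tail_drop (l := l) (i := k)
      simp [hd] at this
      exact this
    rw [PySem.List.pyRange_one_cons (by exact_mod_cast hk)]
    simp only [List.foldl_cons]
    have := ih (k+1) (if st.1 ≤ l.getD k (Char.ofNat 0) then (l.getD k (Char.ofNat 0), (k:Int)) else st) ht'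
    push_cast at this ⊢
    simp only [PySem.List.pyGetD_natCast]
    rw [this, hget]
    rfl

-- pvG from a positive running max picks the suffix maximum and its last index (pvSuffAux's head)
-- unless the running max already beats it
lemma pvG_spec : ∀ (t : List Char) (j : Int) (mc : Char) (mi : Int),
    Char.ofNat 0 < mc → (∀ c ∈ t, Char.ofNat 0 < c) →
    pvG t j (mc, mi) =
      (let p := (pvSuffAux t j).headD (Char.ofNat 0, -1);
       if mc ≤ p.1 then p else (mc, mi)) := by
  intro t
  induction t with
  | nil =>
    intro j mc mi hm _
    simp [pvG, pvSuffAux, not_le.mpr hm]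
  | cons c t' ih =>
    intro j mc mi hm ht
    have hc : Char.ofNat 0 < c := ht c (by simp)
    have ht' : ∀ x ∈ t', Char.ofNat 0 < x := fun x hx => ht x (by simp [hx])
    show pvG t' (j+1) (if mc ≤ c then (c, j) else (mc, mi)) = _
    by_cases hmc : mc ≤ c
    · rw [if_pos hmc, ih (j+1) c j hc ht']
      simp only [pvSuffAux]
      set p' := (pvSuffAux t' (j+1)).headD (Char.ofNat 0, -1) with hp'
      by_cases hcp : c ≤ p'.1
      · have : ¬ p'.1 < c := not_lt.mpr hcp
        simp [this, hcp, le_trans hmc hcp]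
      · have hlt : p'.1 < c := not_le.mp hcp
        simp [hlt, hcp, hmc]
    · rw [if_neg hmc, ih (j+1) mc mi hm ht']
      have hcm : c < mc := not_le.mp hmc
      simp only [pvSuffAux]
      set p' := (pvSuffAux t' (j+1)).headD (Char.ofNat 0, -1) with hp'
      by_cases hcp : p'.1 < c
      · simp [hcp, not_le.mpr hcm, not_le.mpr (lt_trans hcp hcm)]
      · simp [hcp]

-- the two loops agree at every outer position i
lemma pvMain_aux (s : String) (l : List Char) (hl : ∀ c ∈ l, Char.ofNat 0 < c) :
    ∀ (i : Nat),
    largest_lexicographical_aux s l i =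
      pvScan s l ((l.drop i).zip (pvSuffAux (l.drop (i + 1)) ((i : Int) + 1))) i := by
  suffices H : ∀ (d i : Nat), l.length - i ≤ d →
      largest_lexicographical_aux s l i =
        pvScan s l ((l.drop i).zip (pvSuffAux (l.drop (i + 1)) ((i : Int) + 1))) i by
    intro i; exact H (l.length - i) i le_rfl
  intro d
  induction d with
  | zero =>
    intro i hd
    have hi : l.length ≤ i := by omega
    rw [largest_lexicographical_aux]
    simp [List.drop_eq_nil_of_le hi, pvScan, Nat.not_lt.mpr hi]
  | succ d ih =>
    intro i hd
    by_cases hi : i < l.length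
    · have hdi : l.drop i = l[i] :: l.drop (i + 1) := List.drop_eq_getElem_cons hi
      have hgd : l.getD i (Char.ofNat 0) = l[i] := by
        simp [List.getD_eq_getElem?_getD, List.getElem?_eq_getElem hi]
      have hpos : Char.ofNat 0 < l[i] := hl _ (List.getElem_mem hi)
      have hpos' : ∀ x ∈ l.drop (i+1), Char.ofNat 0 < x :=
        fun x hx => hl x (List.mem_of_mem_drop hx)
      have hcast : ((i : Int) + 1) = (((i+1 : Nat)) : Int) := by push_cast; ring
      have hcast2 : (((i+1 : Nat)) : Int) + 1 = (((i+2 : Nat)) : Int) := by push_cast; ring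
      have hfold := pvFoldl_eq_pvG l (l.drop (i+1)) (i+1) (l[i], (i : Int)) rfl
      have hg := pvG_spec (l.drop (i+1)) (((i+1 : Nat)) : Int) l[i] (i : Int) hpos hpos'
      rw [largest_lexicographical_aux]
      simp only [dif_pos hi, PySem.List.pyGetD_natCast, hgd]
      rw [hcast, hfold, hg]
      set p := (pvSuffAux (l.drop (i+1)) (((i+1 : Nat)) : Int)).headD (Char.ofNat 0, -1) with hp
      have hzip : (l.drop i).zip (pvSuffAux (l.drop (i + 1)) (((i+1 : Nat)) : Int)) =
          (l[i], p) :: ((l.drop (i+1)).zip (pvSuffAux (l.drop (i + 2)) (((i+2 : Nat)) : Int))) := by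
        rw [hdi]
        cases hdd : l.drop (i+1) with
        | nil =>
          have hu : l.drop (i+2) = [] :=
            List.drop_eq_nil_of_le (by have := List.drop_eq_nil_iff.mp hdd; omega)
          simp [hp, hdd, hu, pvSuffAux]
        | cons e u =>
          have hu : l.drop (i+2) = u := by
            have := List.tail_drop (l := l) (i := i+1)
            rw [hdd] at this
            simpa using this.symm
          rw [hu, hp, hdd]
          simp only [pvSuffAux, List.headD_cons, List.zip_cons_cons]
          rw [hcast2]
      rw [hzip]
      by_cases hb : l[i] < p.1
      · have hle : l[i] ≤ p.1 := le_of_lt hb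
        simp only [pvScan, if_pos hle, if_pos hb, PySem.List.pyGetD_natCast, hgd]
      · have hrec := ih (i+1) (by omega)
        rw [hcast2] at hrec
        by_cases hle : l[i] ≤ p.1
        · simp only [pvScan, if_pos hle, if_neg hb, hrec]
        · simp only [pvScan, if_neg hle, if_neg hb, if_neg (lt_irrefl l[i]), hrec]
    · have hile : l.length ≤ i := by omega
      rw [largest_lexicographical_aux]
      simp [List.drop_eq_nil_of_le hile, pvScan, Nat.not_lt.mpr hile]

-- ===== VERDICT (by name: the statement is the Claim_ definition above) =====
theorem largest_lexicographical_spec : Claim_equal_largest_lexicographical := by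
  intro s hdom
  unfold Dom_largest_lexicographical pvDomStr at hdom
  have hl : ∀ c ∈ s.toList, Char.ofNat 0 < c := by
    intro c hc
    have := List.all_eq_true.mp hdom c hc
    simp only [pvDomChar, Bool.or_eq_true, Bool.and_eq_true, decide_eq_true_eq, beq_iff_eq] at this
    have h9 : 9 ≤ c.toNat := by omega
    exact Char.lt_def.mpr (by simpa [Char.ofNat] using Nat.lt_of_lt_of_le (by norm_num) h9)
  have hmain := pvMain_aux s s.toList hl 0
  show largest_lexicographical s = largest_lexicographical_alt s
  unfold largest_lexicographical largest_lexicographical_alt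
  rw [hmain]
  congr 1
  cases hc : s.toList with
  | nil => simp
  | cons c t => simp [pvSuffAux]
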